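-- pv_equiv track=rewrite | github.com/ivo-bass/Python-101-Forever | C01/C01P16 - Nokia keypad/numbers_to_message.py | numbers_to_message
-- ===== SOURCE A (Python) =====
-- KEYBOARD = (
--     ' ',     # 0
--     '',      # 1
--     'abc',   # 2
--     'def',   # 3
--     'ghi',   # 4
--     'jkl',   # 5
--     'mno',   # 6
--     'pqrs',  # 7
--     'tuv',   # 8
--     'wxyz',  # 9
-- )
--
-- def numbers_to_message(pressed_sequence):
--     msg = []
--     times_pressed = 1
--     is_next_capitalized = False
--
--     for index, button in enumerate(pressed_sequence):
--
--         if button == -1: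
--             continue
--
--         if button == 1:
--             is_next_capitalized = True
--             continue
--
--         if not index == len(pressed_sequence) - 1 \
--                 and button == pressed_sequence[index + 1]:
--             times_pressed += 1
--             continue
--
--         letters_in_button = len(KEYBOARD[button])
--         letter_index = (times_pressed + letters_in_button - 1) % letters_in_button
--         letter = KEYBOARD[button][letter_index]
--
--         if is_next_capitalized:
--             letter = letter.upper()
--             is_next_capitalized = False
--
--         msg.append(letter)
--         times_pressed = 1
--
--     return ''.join(msg)
-- ===== SOURCE B (Python) =====
-- KEYBOARD = (
--     ' ',     # 0
--     '',      # 1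
--     'abc',   # 2
--     'def',   # 3
--     'ghi',   # 4
--     'jkl',   # 5
--     'mno',   # 6
--     'pqrs',  # 7
--     'tuv',   # 8
--     'wxyz',  # 9
-- )
--
-- def numbers_to_message(pressed_sequence):
--     # Phase 1: run-length encode the sequence into (button, count) pairs.
--     runs = []
--     prev = 0
--     count = 0
--     for b in pressed_sequence:
--         if count and b == prev:
--             count += 1
--         else:
--             if count:
--                 runs.append((prev, count))
--             prev, count = b, 1
--     if count:
--         runs.append((prev, count))
--     # Phase 2: turn each run into a letter.
--     letters = []
--     cap = False
--     for b, count in runs: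
--         if b == -1:
--             continue
--         if b == 1:
--             cap = True
--             continue
--         n = len(KEYBOARD[b])
--         letter = KEYBOARD[b][(count + n - 1) % n]
--         if cap:
--             letter = letter.upper()
--             cap = False
--         letters.append(letter)
--     return ''.join(letters)
-- ===== Notes on version B (the rewrite author's own statement) =====
-- stated objective: alternative
-- what changed: Replaced A's single pass with an index look-ahead (pressed_sequence[index+1]) and a times_pressed accumulator by a two-phase pass: run-length encode the sequence into (button, count) runs, then map each run to its letter.
import Mathlib
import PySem

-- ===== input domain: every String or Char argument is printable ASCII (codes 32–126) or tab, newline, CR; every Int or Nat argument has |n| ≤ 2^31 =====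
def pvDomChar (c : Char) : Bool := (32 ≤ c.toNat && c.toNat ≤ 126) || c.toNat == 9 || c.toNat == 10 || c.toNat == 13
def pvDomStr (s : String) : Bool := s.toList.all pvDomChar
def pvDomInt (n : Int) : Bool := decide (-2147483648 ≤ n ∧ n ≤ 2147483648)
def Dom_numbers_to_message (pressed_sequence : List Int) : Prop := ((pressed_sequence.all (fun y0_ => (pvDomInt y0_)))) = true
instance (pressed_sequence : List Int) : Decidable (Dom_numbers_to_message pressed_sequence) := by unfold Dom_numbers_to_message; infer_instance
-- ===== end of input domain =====

-- B replaces A's look-ahead/accumulator loop by a two-phase pass (run-length encode, then map runs to letters); same return value, objective: alternative decomposition.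

-- ===== PORT A =====
-- KEYBOARD tuple of A's module
def keyboardA : List (List Char) :=
  [[' '], [], ['a','b','c'], ['d','e','f'], ['g','h','i'], ['j','k','l'],
   ['m','n','o'], ['p','q','r','s'], ['t','u','v'], ['w','x','y','z']]

-- KEYBOARD[button][(times_pressed + n - 1) % n]; none exactly where Python raises
-- (IndexError on the outer lookup, ZeroDivisionError when KEYBOARD[button] is '')
def kbLetterA (button times_pressed : Int) : Option Char :=
  match PySem.List.pyGet? keyboardA button with
  | none => none
  | some letters =>
    let n : Int := letters.length
    if n = 0 then none
    else PySem.List.pyGet? letters (PySem.Int.mod (times_pressed + n - 1) n)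

-- one iteration of A's for-loop; state = (msg, times_pressed, is_next_capitalized)
def stepA (s : List Int) (st : List Char × Int × Bool) (ib : Int × Int) : List Char × Int × Bool :=
  let (msg, tp, cap) := st
  let (index, button) := ib
  if button = -1 then (msg, tp, cap)
  else if button = 1 then (msg, tp, true)
  else if index ≠ (s.length : Int) - 1 ∧ PySem.List.pyGet? s (index + 1) = some button then
    (msg, tp + 1, cap)
  else
    match kbLetterA button tp with
    | some c => (msg ++ [if cap then PySem.Chars.upperChar c else c], 1, false)
    | none => (msg, 1, false)   -- Python raises here; excluded by Pre_

def numbers_to_message (pressed_sequence : List Int) : String :=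
  let st := (PySem.List.enumerate pressed_sequence 0).foldl (stepA pressed_sequence) ([], 1, false)
  String.ofList st.1

-- ===== PORT B =====
def keyboardB : List (List Char) :=
  [[' '], [], ['a','b','c'], ['d','e','f'], ['g','h','i'], ['j','k','l'],
   ['m','n','o'], ['p','q','r','s'], ['t','u','v'], ['w','x','y','z']]

-- KEYBOARD[b][(count + n - 1) % n]; none exactly where Python raises
def kbLetterB (b count : Int) : Option Char :=
  match PySem.List.pyGet? keyboardB b with
  | none => none
  | some letters =>
    let n : Int := letters.length
    if n = 0 then none
    else PySem.List.pyGet? letters (PySem.Int.mod (count + n - 1) n)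

-- Phase 1 of Source B: run-length encoding; state = (runs, prev, count)
def rleStepB (st : List (Int × Int) × Int × Int) (b : Int) : List (Int × Int) × Int × Int :=
  let (runs, prev, count) := st
  if count ≠ 0 ∧ b = prev then (runs, prev, count + 1)
  else ((if count ≠ 0 then runs ++ [(prev, count)] else runs), b, 1)

def rleFinishB (st : List (Int × Int) × Int × Int) : List (Int × Int) :=
  if st.2.2 ≠ 0 then st.1 ++ [(st.2.1, st.2.2)] else st.1

def rleB (s : List Int) : List (Int × Int) :=
  rleFinishB (s.foldl rleStepB ([], 0, 0))

-- Phase 2 of Source B: one run -> at most one letter; state = (letters, cap)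
def stepRunB (st : List Char × Bool) (r : Int × Int) : List Char × Bool :=
  let (letters, cap) := st
  let (b, count) := r
  if b = -1 then (letters, cap)
  else if b = 1 then (letters, true)
  else
    match kbLetterB b count with
    | some c => (letters ++ [if cap then PySem.Chars.upperChar c else c], false)
    | none => (letters, false)   -- Python raises here; excluded by Pre_

def numbers_to_message_alt (pressed_sequence : List Int) : String :=
  let st := (rleB pressed_sequence).foldl stepRunB ([], false)
  String.ofList st.1

-- ===== PRECONDITION & SPEC =====
-- Pre_ excludes exactly the buttons on which Python A raises: values ≥ 10 or ≤ -11
-- (IndexError) and -9 (ZeroDivisionError, KEYBOARD[-9] is the empty string '').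
def Pre_numbers_to_message (pressed_sequence : List Int) : Prop :=
  ∀ b ∈ pressed_sequence, b = -1 ∨ b = 1 ∨ (-10 ≤ b ∧ b ≤ 9 ∧ b ≠ -9)
instance (pressed_sequence : List Int) : Decidable (Pre_numbers_to_message pressed_sequence) := by
  unfold Pre_numbers_to_message; infer_instance

def pvWitness_numbers_to_message : List Int := [1, 4, 4, 3, 3, 0, 1, 6, 6, 6, -1, 6, 6, 6]

def Spec_numbers_to_message (pressed_sequence : List Int) (out : String) : Prop := out = numbers_to_message_alt pressed_sequence
instance (pressed_sequence : List Int) (out : String) : Decidable (Spec_numbers_to_message pressed_sequence out) := by unfold Spec_numbers_to_message; infer_instance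

-- ===== CLAIM (what is proved, stated in full; the proofs are below) =====
def Claim_equal_numbers_to_message : Prop := ∀ (pressed_sequence : List Int), Dom_numbers_to_message pressed_sequence → Pre_numbers_to_message pressed_sequence → Spec_numbers_to_message pressed_sequence (numbers_to_message pressed_sequence)

-- ===== LEMMAS AND PROOFS =====

-- the two keyboard letter lookups are identical code
theorem kbLetterA_eq_B : kbLetterA = kbLetterB := rfl

-- A's loop, rewritten as structural recursion with head? of the rest as the look-ahead
def recA (st : List Char × Int × Bool) : List Int → List Char × Int × Bool
  | [] => st
  | b :: rest =>
    if b = -1 then recA st rest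
    else if b = 1 then recA (st.1, st.2.1, true) rest
    else if rest.head? = some b then recA (st.1, st.2.1 + 1, st.2.2) rest
    else
      match kbLetterA b st.2.1 with
      | some c => recA (st.1 ++ [if st.2.2 then PySem.Chars.upperChar c else c], 1, false) rest
      | none => recA (st.1, 1, false) rest

theorem foldA_eq_recA (suf : List Int) : ∀ (pre : List Int) (st : List Char × Int × Bool),
    (PySem.List.enumerate suf ((pre.length : Int))).foldl (stepA (pre ++ suf)) st = recA st suf := by
  induction suf with
  | nil => intro pre st; simp [PySem.List.enumerate, recA]
  | cons b rest ih =>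
    intro pre st
    rw [PySem.List.enumerate_cons, List.foldl_cons]
    -- the look-ahead condition of A is exactly "the next element equals b"
    have hcond : (((pre.length : Int) ≠ ((pre ++ b :: rest).length : Int) - 1 ∧
        PySem.List.pyGet? (pre ++ b :: rest) ((pre.length : Int) + 1) = some b)) ↔ rest.head? = some b := by
      cases rest with
      | nil => simp
      | cons r rest2 =>
        have hg : PySem.List.pyGet? (pre ++ b :: r :: rest2) ((pre.length : Int) + 1) = some r := by
          have hc : ((pre.length : Int) + 1) = ((pre.length + 1 : Nat) : Int) := by push_cast; ring
          rw [hc, PySem.List.pyGet?_natCast, List.getElem?_append_right (by omega)]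
          simp
        simp [hg]
        intro _; omega
    have ihb : ∀ st' : List Char × Int × Bool,
        (PySem.List.enumerate rest ((pre.length : Int) + 1)).foldl (stepA (pre ++ b :: rest)) st' = recA st' rest := by
      intro st'
      have h1 := ih (pre ++ [b]) st'
      simpa using h1
    by_cases h1 : b = -1
    · have hs : stepA (pre ++ b :: rest) st ((pre.length : Int), b) = st := by
        simp [stepA, h1]
      rw [hs, ihb st]
      simp [recA, h1]
    · by_cases h2 : b = 1
      · have hs : stepA (pre ++ b :: rest) st ((pre.length : Int), b) = (st.1, st.2.1, true) := by
          simp [stepA, h2]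
        rw [hs, ihb _]
        simp [recA, h2]
      · by_cases h3 : rest.head? = some b
        · have hs : stepA (pre ++ b :: rest) st ((pre.length : Int), b) = (st.1, st.2.1 + 1, st.2.2) := by
            simp only [stepA, if_neg h1, if_neg h2, if_pos (hcond.mpr h3)]
          rw [hs, ihb _]
          simp [recA, h1, h2, h3]
        · have hnc := fun hc => h3 (hcond.mp hc)
          have hs : stepA (pre ++ b :: rest) st ((pre.length : Int), b) =
              (match kbLetterA b st.2.1 with
               | some c => (st.1 ++ [if st.2.2 then PySem.Chars.upperChar c else c], (1 : Int), false)
               | none => (st.1, 1, false)) := by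
            simp only [stepA, if_neg h1, if_neg h2, if_neg hnc]
          rw [hs]
          cases hkb : kbLetterA b st.2.1 with
          | none => rw [ihb _]; simp [recA, h1, h2, h3, hkb]
          | some c => rw [ihb _]; simp [recA, h1, h2, h3, hkb]

-- the run-length fold absorbs a replicate block into the count
theorem rle_absorb (k : Nat) : ∀ (b : Int) (rest : List Int) (runs : List (Int × Int)) (c : Int),
    1 ≤ c →
    (List.replicate k b ++ rest).foldl rleStepB (runs, b, c) = rest.foldl rleStepB (runs, b, c + k) := by
  induction k with
  | zero => intro b rest runs c _; simp
  | succ k ih =>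
    intro b rest runs c hc
    rw [List.replicate_succ, List.cons_append, List.foldl_cons]
    have hstep : rleStepB (runs, b, c) b = (runs, b, c + 1) := by
      simp [rleStepB, show c ≠ 0 by omega]
    rw [hstep, ih b rest runs (c + 1) (by omega)]
    have hcast : c + 1 + (k : Int) = c + ((k + 1 : Nat) : Int) := by push_cast; ring
    rw [hcast]

-- already-committed runs are an inert prefix of the fold's output
theorem rle_commit (xs : List Int) : ∀ (runs : List (Int × Int)) (prev c : Int),
    1 ≤ c →
    rleFinishB (xs.foldl rleStepB (runs, prev, c)) = runs ++ rleFinishB (xs.foldl rleStepB ([], prev, c)) := by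
  induction xs with
  | nil =>
    intro runs prev c hc
    simp [rleFinishB, show c ≠ 0 by omega]
  | cons x xs ih =>
    intro runs prev c hc
    by_cases hx : x = prev
    · have h1 : rleStepB (runs, prev, c) x = (runs, prev, c + 1) := by
        simp [rleStepB, hx, show c ≠ 0 by omega]
      have h2 : rleStepB ([], prev, c) x = ([], prev, c + 1) := by
        simp [rleStepB, hx, show c ≠ 0 by omega]
      rw [List.foldl_cons, List.foldl_cons, h1, h2, ih runs prev (c + 1) (by omega)]
    · have h1 : rleStepB (runs, prev, c) x = (runs ++ [(prev, c)], x, 1) := by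
        simp [rleStepB, hx, show c ≠ 0 by omega]
      have h2 : rleStepB ([], prev, c) x = ([(prev, c)], x, 1) := by
        simp [rleStepB, hx, show c ≠ 0 by omega]
      rw [List.foldl_cons, List.foldl_cons, h1, h2,
        ih (runs ++ [(prev, c)]) x 1 (by omega), ih [(prev, c)] x 1 (by omega)]
      simp

theorem rle_run (b : Int) (k : Nat) (rest : List Int) (h : rest.head? ≠ some b) :
    rleB (List.replicate (k + 1) b ++ rest) = (b, (k : Int) + 1) :: rleB rest := by
  unfold rleB
  rw [List.replicate_succ, List.cons_append, List.foldl_cons]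
  have h0 : rleStepB ([], 0, 0) b = ([], b, 1) := by simp [rleStepB]
  rw [h0, rle_absorb k b rest [] 1 (by omega)]
  cases rest with
  | nil =>
    simp only [List.foldl_nil, rleFinishB]
    rw [if_pos (by simp; omega)]
    simp; ring
  | cons r rest2 =>
    have hr : r ≠ b := by simpa using h
    rw [List.foldl_cons]
    have h1 : rleStepB ([], b, 1 + (k : Int)) r = ([(b, 1 + (k : Int))], r, 1) := by
      simp [rleStepB, hr, show (1 : Int) + (k : Int) ≠ 0 by omega]
    have h2 : rleStepB ([], 0, 0) r = ([], r, 1) := by simp [rleStepB]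
    rw [h1]
    conv_rhs => rw [List.foldl_cons, h2]
    rw [rle_commit rest2 [(b, 1 + (k : Int))] r 1 (by omega)]
    simp; ring

-- A's recursion over one maximal run of button b
theorem recA_run (k : Nat) : ∀ (b : Int) (rest : List Int) (st : List Char × Int × Bool),
    rest.head? ≠ some b →
    recA st (List.replicate (k + 1) b ++ rest) =
      if b = -1 then recA st rest
      else if b = 1 then recA (st.1, st.2.1, true) rest
      else
        match kbLetterA b (st.2.1 + (k : Int)) with
        | some c => recA (st.1 ++ [if st.2.2 then PySem.Chars.upperChar c else c], 1, false) rest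
        | none => recA (st.1, 1, false) rest := by
  induction k with
  | zero =>
    intro b rest st h
    simp only [List.replicate_succ, List.replicate_zero, List.nil_append, List.cons_append,
      recA, Nat.cast_zero, add_zero]
    rw [if_neg h]
  | succ k ih =>
    intro b rest st h
    rw [List.replicate_succ, List.cons_append]
    have hhead : (List.replicate (k + 1) b ++ rest).head? = some b := by
      simp [List.replicate_succ]
    by_cases h1 : b = -1
    · simp only [recA, if_pos h1]
      rw [ih b rest st h]
      simp [h1]
    · by_cases h2 : b = 1
      · simp only [recA, if_neg h1, if_pos h2]
        rw [ih b rest _ h]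
        simp [h2]
      · simp only [recA, if_neg h1, if_neg h2, if_pos hhead]
        rw [ih b rest (st.1, st.2.1 + 1, st.2.2) h]
        simp only [if_neg h1, if_neg h2]
        have hc : st.2.1 + 1 + (k : Int) = st.2.1 + ((k + 1 : Nat) : Int) := by push_cast; ring
        rw [hc]

theorem recA_eq_B (s : List Int) : ∀ (msg : List Char) (cap : Bool),
    recA (msg, 1, cap) s =
      (((rleB s).foldl stepRunB (msg, cap)).1, 1, ((rleB s).foldl stepRunB (msg, cap)).2) := by
  have key : ∀ (n : Nat) (s : List Int), s.length ≤ n → ∀ (msg : List Char) (cap : Bool),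
      recA (msg, 1, cap) s =
        (((rleB s).foldl stepRunB (msg, cap)).1, 1, ((rleB s).foldl stepRunB (msg, cap)).2) := by
    intro n
    induction n with
    | zero =>
      intro s hs msg cap
      have : s = [] := List.length_eq_zero_iff.mp (by omega)
      subst this
      simp [recA, rleB, rleFinishB]
    | succ n ihn =>
      intro s hs msg cap
      cases s with
      | nil => simp [recA, rleB, rleFinishB]
      | cons b t =>
        -- decompose the head run: b :: t = replicate (k+1) b ++ rest
        set k := (t.takeWhile (· = b)).length with hk
        set rest := t.dropWhile (· = b) with hrest
        have htake : t.takeWhile (· = b) = List.replicate k b := by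
          apply List.eq_replicate_of_mem
          intro x hx
          have := List.mem_takeWhile_imp hx
          simpa using this
        have hdecomp : b :: t = List.replicate (k + 1) b ++ rest := by
          rw [List.replicate_succ, List.cons_append]
          congr 1
          rw [← htake, hrest, List.takeWhile_append_dropWhile]
        have hhead : rest.head? ≠ some b := by
          intro hcontr
          have := List.head?_dropWhile_not (fun x => decide (x = b)) t
          rw [← hrest] at this
          rw [hcontr] at this
          simp at this
        have hlen : rest.length ≤ n := by
          have h1 : rest.length ≤ t.length := by
            rw [hrest]; exact List.length_dropWhile_le _ _
          simp at hs; omega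
        rw [hdecomp, recA_run k b rest (msg, 1, cap) hhead, rle_run b k rest hhead,
          List.foldl_cons]
        by_cases h1 : b = -1
        · have hsr : stepRunB (msg, cap) (b, (k : Int) + 1) = (msg, cap) := by
            simp [stepRunB, h1]
          rw [if_pos h1, hsr, ihn rest hlen msg cap]
        · by_cases h2 : b = 1
          · have hsr : stepRunB (msg, cap) (b, (k : Int) + 1) = (msg, true) := by
              simp [stepRunB, h2]
            rw [if_neg h1, if_pos h2, hsr, ihn rest hlen msg true]
          · have harg : (1 : Int) + (k : Int) = (k : Int) + 1 := by ring
            have hsr : stepRunB (msg, cap) (b, (k : Int) + 1) =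
                (match kbLetterA b ((1 : Int) + (k : Int)) with
                 | some c => (msg ++ [if cap then PySem.Chars.upperChar c else c], false)
                 | none => (msg, false)) := by
              simp only [stepRunB, if_neg h1, if_neg h2, ← kbLetterA_eq_B, harg]
            rw [if_neg h1, if_neg h2, hsr]
            cases hkb : kbLetterA b ((1 : Int) + (k : Int)) with
            | none => simp only; rw [ihn rest hlen msg false]
            | some c => simp only; rw [ihn rest hlen _ false]
  intro msg cap
  exact key s.length s le_rfl msg cap

-- ===== VERDICT (by name: the statement is the Claim_ definition above) =====
theorem numbers_to_message_spec : Claim_equal_numbers_to_message := by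
  intro s _ _
  unfold Spec_numbers_to_message numbers_to_message numbers_to_message_alt
  have h1 := foldA_eq_recA s [] ([], 1, false)
  simp only [List.nil_append, List.length_nil, Int.natCast_zero] at h1
  rw [h1, recA_eq_B s [] false]
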